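-- pv_equiv track=rewrite | github.com/NeomSense/Omniphi | ai/governance_model/v1/export_ordinal_int_weights.py | features_dict_to_vector
-- ===== SOURCE A (Python) =====
-- FEATURE_ORDER = [
--     "is_upgrade",                 # 0  binary
--     "is_param_change",            # 1  binary
--     "is_treasury_spend",          # 2  binary
--     "is_slashing_change",         # 3  binary
--     "is_poc_rule_change",         # 4  binary
--     "is_poseq_rule_change",       # 5  binary
--     "treasury_spend_bps",         # 6  numeric 0-10000
--     "modules_touched_count",      # 7  numeric 0-50
--     "touches_consensus_critical", # 8  binary
--     "reduces_slashing",           # 9  binary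
--     "changes_validator_rules",    # 10 binary
-- ]
--
-- NUM_FEATURES = 11
--
-- def features_dict_to_vector(d: dict) -> list[int]:
--     """Convert {feature_name: value} to canonical 11-element vector."""
--     name_to_idx = {name: i for i, name in enumerate(FEATURE_ORDER)}
--     vec = [0] * NUM_FEATURES
--     for name, val in d.items():
--         if name not in name_to_idx:
--             raise ValueError(f"Unknown feature: {name}")
--         vec[name_to_idx[name]] = int(val)
--     return vec
-- ===== SOURCE B (Python) =====
-- FEATURE_ORDER = [
--     "is_upgrade",
--     "is_param_change",
--     "is_treasury_spend",
--     "is_slashing_change",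
--     "is_poc_rule_change",
--     "is_poseq_rule_change",
--     "treasury_spend_bps",
--     "modules_touched_count",
--     "touches_consensus_critical",
--     "reduces_slashing",
--     "changes_validator_rules",
-- ]
--
-- NUM_FEATURES = 11
--
-- def features_dict_to_vector(d: dict) -> list[int]:
--     """Convert {feature_name: value} to canonical 11-element vector."""
--     unknown = set(d) - set(FEATURE_ORDER)
--     if unknown:
--         raise ValueError(f"Unknown feature: {next(iter(unknown))}")
--     return [int(d.get(name, 0)) for name in FEATURE_ORDER]
-- ===== Notes on version B (the rewrite author's own statement) =====
-- stated objective: simpler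
-- what changed: B validates all keys up front (set difference) and then builds the vector by a single comprehension over FEATURE_ORDER with a default of 0, instead of A's name_to_idx index map and scatter-writes into a zero-initialized list.
import Mathlib
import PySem

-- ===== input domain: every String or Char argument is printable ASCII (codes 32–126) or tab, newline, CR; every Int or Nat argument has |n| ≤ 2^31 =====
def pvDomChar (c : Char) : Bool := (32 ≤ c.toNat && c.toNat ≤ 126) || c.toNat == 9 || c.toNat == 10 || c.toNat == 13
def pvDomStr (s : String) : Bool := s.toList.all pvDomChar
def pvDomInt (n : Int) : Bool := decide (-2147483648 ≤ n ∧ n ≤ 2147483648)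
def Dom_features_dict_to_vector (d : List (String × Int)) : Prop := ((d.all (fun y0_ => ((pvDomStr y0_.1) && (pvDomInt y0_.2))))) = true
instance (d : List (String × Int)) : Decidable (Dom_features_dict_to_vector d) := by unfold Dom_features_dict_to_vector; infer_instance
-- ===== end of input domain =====

-- B validates keys up front and builds the vector by a map over FEATURE_ORDER with default 0,
-- instead of A's name_to_idx index map and scatter-writes into a zero-initialized list (objective: simpler).

def FEATURE_ORDER : List String :=
  ["is_upgrade", "is_param_change", "is_treasury_spend", "is_slashing_change",
   "is_poc_rule_change", "is_poseq_rule_change", "treasury_spend_bps",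
   "modules_touched_count", "touches_consensus_critical", "reduces_slashing",
   "changes_validator_rules"]

-- ===== PORT A =====
-- name_to_idx = {name: i for i, name in enumerate(FEATURE_ORDER)}
def fdtvNameToIdx : PySem.Dict String Int :=
  (PySem.List.enumerate FEATURE_ORDER).foldl (fun m p => m.insert p.2 p.1) PySem.Dict.empty

-- the for-loop over d.items(); none = the explicit 'raise ValueError' on an unknown feature
def fdtvLoop : List (String × Int) → List Int → Option (List Int)
  | [], vec => some vec
  | (name, val) :: rest, vec =>
      match fdtvNameToIdx.get? name with
      | none => none
      | some i => fdtvLoop rest (vec.set i.toNat val)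

def features_dict_to_vector (d : List (String × Int)) : List Int :=
  (fdtvLoop (PySem.Dict.ofList d).items (List.replicate 11 0)).getD []

-- ===== PORT B =====
def features_dict_to_vector_alt (d : List (String × Int)) : List Int :=
  let dd := PySem.Dict.ofList d
  if dd.keys.all (fun k => FEATURE_ORDER.contains k) then
    FEATURE_ORDER.map (fun n => dd.getD n 0)
  else []   -- raise ValueError (excluded by Pre_)

-- ===== PRECONDITION & SPEC =====
-- A raises ValueError exactly when some key of d is not a feature name; Pre_ excludes those inputs.
def Pre_features_dict_to_vector (d : List (String × Int)) : Prop :=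
  ∀ p ∈ d, p.1 ∈ FEATURE_ORDER
instance (d : List (String × Int)) : Decidable (Pre_features_dict_to_vector d) := by
  unfold Pre_features_dict_to_vector; infer_instance

def pvWitness_features_dict_to_vector : (List (String × Int)) :=
  [("is_upgrade", 1), ("treasury_spend_bps", 250)]

def Spec_features_dict_to_vector (d : List (String × Int)) (out : List Int) : Prop := out = features_dict_to_vector_alt d
instance (d : List (String × Int)) (out : List Int) : Decidable (Spec_features_dict_to_vector d out) := by unfold Spec_features_dict_to_vector; infer_instance

-- ===== CLAIM (what is proved, stated in full; the proofs are below) =====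
def Claim_equal_features_dict_to_vector : Prop := ∀ (d : List (String × Int)), Dom_features_dict_to_vector d → Pre_features_dict_to_vector d → Spec_features_dict_to_vector d (features_dict_to_vector d)

-- ===== LEMMAS AND PROOFS =====

-- name_to_idx lookup on a known feature name: the index, and its uniqueness in FEATURE_ORDER
lemma fdtvNameToIdx_spec (name : String) (h : name ∈ FEATURE_ORDER) :
    ∃ i : Nat, i < 11 ∧ fdtvNameToIdx.get? name = some (i : Int) ∧
      (∀ j : Nat, j < 11 → (FEATURE_ORDER.getD j "" = name ↔ j = i)) := by
  simp only [FEATURE_ORDER, List.mem_cons, List.not_mem_nil, or_false] at h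
  rcases h with h | h | h | h | h | h | h | h | h | h | h <;> subst h
  · exact ⟨0, by decide, by decide, by decide⟩
  · exact ⟨1, by decide, by decide, by decide⟩
  · exact ⟨2, by decide, by decide, by decide⟩
  · exact ⟨3, by decide, by decide, by decide⟩
  · exact ⟨4, by decide, by decide, by decide⟩
  · exact ⟨5, by decide, by decide, by decide⟩
  · exact ⟨6, by decide, by decide, by decide⟩
  · exact ⟨7, by decide, by decide, by decide⟩
  · exact ⟨8, by decide, by decide, by decide⟩
  · exact ⟨9, by decide, by decide, by decide⟩
  · exact ⟨10, by decide, by decide, by decide⟩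

lemma lookup_eq_none_of_not_mem {xs : List (String × Int)} {n : String}
    (h : n ∉ xs.map Prod.fst) : xs.lookup n = none := by
  induction xs with
  | nil => rfl
  | cons p rest ih =>
      simp only [List.map_cons, List.mem_cons, not_or] at h
      rcases p with ⟨k, v⟩
      simp only [List.lookup_cons]
      have hb : (n == k) = false := by
        simp only [beq_eq_false_iff_ne]; exact h.1
      rw [hb]
      exact ih h.2

-- loop invariant: on nodup known keys, the fold computes the per-feature first-match lookup
lemma fdtvLoop_inv : ∀ (xs : List (String × Int)) (vec : List Int), vec.length = 11 →
    (xs.map Prod.fst).Nodup → (∀ p ∈ xs, p.1 ∈ FEATURE_ORDER) →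
    fdtvLoop xs vec =
      some (FEATURE_ORDER.zipIdx.map (fun q => ((xs.lookup q.1).getD (vec.getD q.2 0)))) := by
  intro xs
  induction xs with
  | nil =>
      intro vec hlen _ _
      simp only [fdtvLoop, Option.some.injEq]
      apply List.ext_getElem
      · simp [FEATURE_ORDER, hlen]
      · intro j hj1 hj2
        simp only [List.getElem_map, List.getElem_zipIdx, List.lookup_nil, Option.getD_none]
        rw [List.getD_eq_getElem _ _ (by simpa [hlen] using hj1)]
        simp
  | cons p rest ih =>
      rcases p with ⟨name, val⟩
      intro vec hlen hnd hmem
      have hname : name ∈ FEATURE_ORDER := hmem (name, val) (List.mem_cons_self ..)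
      obtain ⟨i, hi11, hget, hiff⟩ := fdtvNameToIdx_spec name hname
      simp only [List.map_cons, List.nodup_cons] at hnd
      have hrest :
          fdtvLoop rest (vec.set i val) =
            some (FEATURE_ORDER.zipIdx.map
              (fun q => ((rest.lookup q.1).getD ((vec.set i val).getD q.2 0)))) := by
        exact ih (vec.set i val) (by simp [hlen])
          hnd.2 (fun q hq => hmem q (List.mem_cons_of_mem _ hq))
      simp only [fdtvLoop, hget, Int.toNat_natCast, hrest, Option.some.injEq]
      apply List.map_congr_left
      intro q hq
      rcases q with ⟨n, j⟩
      rw [List.mem_zipIdx_iff_getElem?] at hq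
      have hj11 : j < 11 := by
        have := hq
        have hlt : j < FEATURE_ORDER.length := by
          rcases List.getElem?_eq_some_iff.mp hq with ⟨hlt, _⟩
          exact hlt
        simpa [FEATURE_ORDER] using hlt
      have hfo : FEATURE_ORDER.getD j "" = n := by
        rcases List.getElem?_eq_some_iff.mp hq with ⟨hlt, he⟩
        rw [List.getD_eq_getElem _ _ hlt]; exact he
      by_cases hcase : n = name
      · subst hcase
        have hji : j = i := (hiff j hj11).mp hfo
        subst hji
        simp only [List.lookup_cons, BEq.rfl, Option.getD_some]
        rw [lookup_eq_none_of_not_mem hnd.1]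
        simp only [Option.getD_none]
        rw [List.getD_eq_getElem _ _ (by rw [List.length_set, hlen]; omega : j < (vec.set j val).length)]
        simp
      · have hji : j ≠ i := fun hji => hcase ((hiff j hj11).mpr hji ▸ hfo).symm
        have hbeq : (n == name) = false := by
          simp only [beq_eq_false_iff_ne]; exact hcase
        simp only [List.lookup_cons, hbeq]
        have : (vec.set i val).getD j 0 = vec.getD j 0 := by
          rw [List.getD_eq_getElem _ _ (by rw [List.length_set, hlen]; omega : j < (vec.set i val).length),
              List.getD_eq_getElem _ _ (by rw [hlen]; omega : j < vec.length)]
          exact List.getElem_set_ne (show i ≠ j from fun h => hji h.symm) _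
        rw [this]

lemma get?_mk_eq_lookup (xs : List (String × Int)) (n : String) :
    (PySem.Dict.mk xs).get? n = xs.lookup n := by
  induction xs with
  | nil => rfl
  | cons p rest ih =>
      rcases p with ⟨k, v⟩
      rw [PySem.Dict.get?_mk_cons, List.lookup_cons, ih]
      by_cases h : n = k
      · subst h; simp
      · have h1 : (k == n) = false := by
          simp only [beq_eq_false_iff_ne]; exact fun e => h e.symm
        have h2 : (n == k) = false := by simp only [beq_eq_false_iff_ne]; exact h
        simp [h1, h2]

lemma keys_ofList_sub (d : List (String × Int)) (hp : Pre_features_dict_to_vector d) :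
    ∀ k ∈ (PySem.Dict.ofList d).keys, k ∈ FEATURE_ORDER := by
  intro k hk
  have : (PySem.Dict.ofList d).keys = PySem.Set.update (PySem.Dict.empty : PySem.Dict String Int).keys (d.map Prod.fst) := by
    have hof : PySem.Dict.ofList d = d.foldl (fun m p => m.insert p.1 p.2) PySem.Dict.empty := rfl
    rw [hof]
    exact PySem.Dict.keys_foldl_insert_key d Prod.fst (fun dd p => p.2) PySem.Dict.empty
  rw [this] at hk
  simp only [PySem.Dict.keys_empty, PySem.Set.update_nil_left] at hk
  rw [PySem.Set.mem_ofList] at hk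
  rcases List.mem_map.mp hk with ⟨p, hpmem, rfl⟩
  exact hp p hpmem

-- ===== VERDICT (by name: the statement is the Claim_ definition above) =====
theorem features_dict_to_vector_spec : Claim_equal_features_dict_to_vector := by
  intro d _ hpre
  unfold Spec_features_dict_to_vector features_dict_to_vector features_dict_to_vector_alt
  set dd := PySem.Dict.ofList d with hdd
  have hkeys : ∀ k ∈ dd.keys, k ∈ FEATURE_ORDER := keys_ofList_sub d hpre
  have hnd : dd.keys.Nodup := PySem.Dict.nodup_keys_ofList d
  have hcond : dd.keys.all (fun k => FEATURE_ORDER.contains k) = true := by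
    rw [List.all_eq_true]
    intro k hk
    exact List.contains_iff_mem.mpr (hkeys k hk)
  have hitems : dd.items.map Prod.fst = dd.keys := rfl
  have hinv := fdtvLoop_inv dd.items (List.replicate 11 0) (by simp)
    (by rw [hitems]; exact hnd)
    (by intro p hp; exact hkeys p.1 (by rw [← hitems]; exact List.mem_map_of_mem hp))
  rw [hinv, Option.getD_some, if_pos hcond]
  have hz : ∀ q ∈ FEATURE_ORDER.zipIdx,
      ((dd.items.lookup (Prod.fst q)).getD ((List.replicate 11 (0:Int)).getD q.2 0))
        = dd.getD q.1 0 := by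
    intro q _
    have h1 : (List.replicate 11 (0:Int)).getD q.2 0 = 0 := by
      rw [List.getD_eq_getElem?_getD, List.getElem?_replicate]
      split <;> rfl
    rw [h1, PySem.Dict.getD_eq_get?_getD]
    have : dd.get? q.1 = dd.items.lookup q.1 := by
      conv_lhs => rw [show dd = PySem.Dict.mk dd.items from rfl]
      exact get?_mk_eq_lookup dd.items q.1
    rw [this]
  rw [List.map_congr_left hz]
  have : FEATURE_ORDER.zipIdx.map (fun q => dd.getD q.1 0)
      = (FEATURE_ORDER.zipIdx.map Prod.fst).map (fun n => dd.getD n 0) := by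
    rw [List.map_map]; rfl
  rw [this, List.zipIdx_map_fst]
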